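-- pv_equiv track=rewrite | github.com/KumarSashank/Code-files | chef/Training/cashew.py | cashew_conjecture
-- ===== SOURCE A (Python) =====
-- def is_prime(n):
--     if n <= 1:
--         return False
--     for i in range(2, int(n**0.5) + 1):
--         if n % i == 0:
--             return False
--     return True
--
-- def cashew_conjecture(n, k):
--     prime_count=0
--     for i in range(2,n+1):
--         if is_prime(i):
--             for j in range(i+1, n+1):
--                 if is_prime(j):
--                     if i+j+1<=k:
--                         prime_count+=1
--     if prime_count>=k:
--         return "YES"
--     else:
--         return "NO"
-- ===== SOURCE B (Python) =====
-- def is_prime(n):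
--     if n <= 1:
--         return False
--     for i in range(2, int(n**0.5) + 1):
--         if n % i == 0:
--             return False
--     return True
--
-- def cashew_conjecture(n, k):
--     # Build the sorted list of primes once, then count, for each prime p,
--     # the later primes q with p + q + 1 <= k by a binary search for the
--     # boundary of q <= k - 1 - p (primes is sorted increasing).
--     primes = [i for i in range(2, n + 1) if is_prime(i)]
--     count = 0
--     for idx, p in enumerate(primes):
--         limit = k - 1 - p
--         lo, hi = 0, len(primes)
--         while lo < hi:
--             mid = (lo + hi) // 2
--             if primes[mid] <= limit:
--                 lo = mid + 1
--             else:
--                 hi = mid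
--         if lo > idx + 1:
--             count += lo - idx - 1
--     return "YES" if count >= k else "NO"
-- ===== Notes on version B (the rewrite author's own statement) =====
-- stated objective: faster
-- what changed: A re-tests primality of every j inside a nested loop over all pairs; B builds the sorted list of primes once and, for each prime p, counts the later primes q with p+q+1<=k by a hand-written binary search for the boundary of q <= k-1-p.
import Mathlib
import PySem

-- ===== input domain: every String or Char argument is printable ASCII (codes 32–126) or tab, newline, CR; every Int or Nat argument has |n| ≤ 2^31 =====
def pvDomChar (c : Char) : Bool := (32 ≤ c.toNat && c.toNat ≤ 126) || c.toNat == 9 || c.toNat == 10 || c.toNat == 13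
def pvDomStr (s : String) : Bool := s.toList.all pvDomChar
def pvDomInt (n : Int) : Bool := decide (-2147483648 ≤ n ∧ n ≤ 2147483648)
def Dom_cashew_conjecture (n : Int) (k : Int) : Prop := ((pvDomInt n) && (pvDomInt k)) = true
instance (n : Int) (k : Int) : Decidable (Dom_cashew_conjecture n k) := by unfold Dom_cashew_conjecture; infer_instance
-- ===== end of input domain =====

-- B replaces A's nested pair loop with repeated primality tests by one pass that
-- collects the sorted primes and a binary search per prime; measurably faster.


-- ===== PORT A =====
-- is_prime, shared module helper of both Pythons.  Python's int(m**0.5) is ported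
-- as Nat.sqrt: exact for 0 ≤ m ≤ 2^31 (double sqrt rounds to isqrt there); the
-- loop with early 'return False' is List.all of 'no divisor'.
def pvIsPrime (m : Int) : Bool :=
  if m ≤ 1 then false
  else (PySem.List.pyRange 2 ((Nat.sqrt m.toNat : Int) + 1) 1).all
        (fun i => !(PySem.Int.mod m i == 0))

def cashew_conjecture (n : Int) (k : Int) : String :=
  let prime_count : Int :=
    (PySem.List.pyRange 2 (n + 1) 1).foldl (fun acc i =>
      if pvIsPrime i then
        (PySem.List.pyRange (i + 1) (n + 1) 1).foldl (fun acc2 j =>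
          if pvIsPrime j then (if i + j + 1 ≤ k then acc2 + 1 else acc2) else acc2) acc
      else acc) 0
  if prime_count ≥ k then "YES" else "NO"

-- ===== PORT B =====
-- the 'while lo < hi' binary-search loop of Source B; primes[mid] is in range
-- whenever lo < hi ≤ len primes, so getD's default is never used.
def pvBsearch (primes : List Int) (limit : Int) (lo hi : Nat) : Nat :=
  if lo < hi then
    let mid := (lo + hi) / 2
    if primes.getD mid 0 ≤ limit then pvBsearch primes limit (mid + 1) hi
    else pvBsearch primes limit lo mid
  else lo
termination_by hi - lo
decreasing_by all_goals omega

def cashew_conjecture_alt (n : Int) (k : Int) : String :=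
  let primes := (PySem.List.pyRange 2 (n + 1) 1).filter (fun i => pvIsPrime i)
  let count : Int :=
    (PySem.List.enumerate primes 0).foldl (fun acc pr =>
      let lo := pvBsearch primes (k - 1 - pr.2) 0 primes.length
      if (lo : Int) > pr.1 + 1 then acc + ((lo : Int) - pr.1 - 1) else acc) 0
  if count ≥ k then "YES" else "NO"

-- ===== PRECONDITION & SPEC =====
def Spec_cashew_conjecture (n : Int) (k : Int) (out : String) : Prop := out = cashew_conjecture_alt n k
instance (n : Int) (k : Int) (out : String) : Decidable (Spec_cashew_conjecture n k out) := by unfold Spec_cashew_conjecture; infer_instance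

-- ===== CLAIM (what is proved, stated in full; the proofs are below) =====
def Claim_equal_cashew_conjecture : Prop := ∀ (n : Int) (k : Int), Dom_cashew_conjecture n k → Spec_cashew_conjecture n k (cashew_conjecture n k)

-- ===== LEMMAS AND PROOFS =====

-- The prime list both counts are about.
def pvPl (n : Int) : List Int := (PySem.List.pyRange 2 (n + 1) 1).filter (fun i => pvIsPrime i)

lemma pvPl_pairwise (n : Int) : (pvPl n).Pairwise (· < ·) :=
  List.Pairwise.filter _ (PySem.List.pairwise_lt_pyRange_one 2 (n + 1))

lemma pvPairwise_mono {l : List Int} (hl : l.Pairwise (· < ·)) :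
    ∀ (i j : Nat) (hi : i < l.length) (hj : j < l.length), i ≤ j → l[i] ≤ l[j] := by
  intro i j hi hj h
  rcases Nat.lt_or_ge i j with hlt | hge
  · exact le_of_lt ((List.pairwise_iff_getElem.mp hl) i j hi hj hlt)
  · have : i = j := by omega
    subst this; exact le_refl _

-- a prefix of trues then falses pins countP
lemma pvCountP_boundary {l : List Int} {pred : Int → Bool} :
    ∀ (r : Nat), r ≤ l.length →
      (∀ j (hj : j < l.length), j < r → pred l[j] = true) →
      (∀ j (hj : j < l.length), r ≤ j → pred l[j] = false) →
      l.countP pred = r := by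
  induction l with
  | nil =>
    intro r hr _ _
    simp only [List.countP_nil]
    simp at hr
    omega
  | cons a t ih =>
    intro r hr h1 h2
    cases r with
    | zero =>
      have ha : pred a = false := h2 0 (by simp) (by omega)
      have ht : t.countP pred = 0 :=
        ih 0 (by omega) (fun j hj hj0 => absurd hj0 (by omega))
          (fun j hj _ => by simpa using h2 (j + 1) (by simp; omega) (by omega))
      simp [ha, ht]
    | succ r' =>
      have ha : pred a = true := h1 0 (by simp) (by omega)
      have ht : t.countP pred = r' :=
        ih r' (by simp at hr; omega)
          (fun j hj hjr => by simpa using h1 (j + 1) (by simp; omega) (by omega))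
          (fun j hj hjr => by simpa using h2 (j + 1) (by simp; omega) (by omega))
      simp [ha, ht]

-- invariant of the binary-search loop
lemma pvBsearch_inv (l : List Int) (x : Int)
    (hs : ∀ (i j : Nat) (hi : i < l.length) (hj : j < l.length), i ≤ j → l[i] ≤ l[j]) :
    ∀ (d lo hi : Nat), hi - lo ≤ d → lo ≤ hi → hi ≤ l.length →
      (∀ j (hj : j < l.length), j < lo → l[j] ≤ x) →
      (∀ j (hj : j < l.length), hi ≤ j → ¬ l[j] ≤ x) →
      pvBsearch l x lo hi ≤ l.length ∧
      (∀ j (hj : j < l.length), j < pvBsearch l x lo hi → l[j] ≤ x) ∧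
      (∀ j (hj : j < l.length), pvBsearch l x lo hi ≤ j → ¬ l[j] ≤ x) := by
  intro d
  induction d with
  | zero =>
    intro lo hi hd hlh hhl h1 h2
    have heq : hi = lo := by omega
    subst heq
    rw [pvBsearch]
    simp only [Nat.lt_irrefl, if_false]
    exact ⟨by omega, h1, h2⟩
  | succ d ih =>
    intro lo hi hd hlh hhl h1 h2
    by_cases hlt : lo < hi
    · rw [pvBsearch]
      simp only [hlt, if_true]
      have hmlen : (lo + hi) / 2 < l.length := by omega
      rw [List.getD_eq_getElem l 0 hmlen]
      by_cases hc : l[(lo + hi) / 2] ≤ x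
      · rw [if_pos hc]
        exact ih ((lo + hi) / 2 + 1) hi (by omega) (by omega) hhl
          (fun j hj hjm => le_trans (hs j ((lo + hi) / 2) hj hmlen (by omega)) hc) h2
      · rw [if_neg hc]
        exact ih lo ((lo + hi) / 2) (by omega) (by omega) (by omega) h1
          (fun j hj hmj hle => hc (le_trans (hs ((lo + hi) / 2) j hmlen hj hmj) hle))
    · have heq : hi = lo := by omega
      subst heq
      rw [pvBsearch]
      simp only [hlt, if_false]
      exact ⟨by omega, h1, h2⟩

-- the per-prime contribution of B equals the per-prime pair count of A
lemma pvKey (P : List Int) (hP : P.Pairwise (· < ·)) (k : Int) (idx : Nat) (h : idx < P.length) :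
    (if ((pvBsearch P (k - 1 - P[idx]) 0 P.length : Int) > (idx : Int) + 1)
       then ((pvBsearch P (k - 1 - P[idx]) 0 P.length : Int) - (idx : Int) - 1) else 0)
    = (P.countP (fun q => decide (P[idx] < q) && decide (q ≤ k - 1 - P[idx])) : Int) := by
  obtain ⟨hrlen, hrlo, hrhi⟩ :=
    pvBsearch_inv P (k - 1 - P[idx]) (pvPairwise_mono hP) P.length 0 P.length
      (by omega) (by omega) (le_refl _)
      (fun j hj hj0 => absurd hj0 (by omega))
      (fun j hj hlenj => absurd hj (by omega))
  have hcount : ∀ (pr : Int → Bool),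
      P.countP pr = (P.take (idx + 1)).countP pr + (P.drop (idx + 1)).countP pr := by
    intro pr
    conv_lhs => rw [← List.take_append_drop (idx + 1) P]
    exact List.countP_append
  have htake : (P.take (idx + 1)).countP
      (fun q => decide (P[idx] < q) && decide (q ≤ k - 1 - P[idx])) = 0 := by
    refine List.countP_eq_zero.mpr ?_
    intro q hq
    obtain ⟨i, hi, hqi⟩ := List.mem_iff_getElem.mp hq
    have hi' : i < P.length := by
      have := List.length_take (i := idx + 1) (l := P); omega
    have hle : P[i] ≤ P[idx] := by
      apply pvPairwise_mono hP i idx hi' h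
      have := List.length_take (i := idx + 1) (l := P)
      omega
    rw [List.getElem_take] at hqi
    subst hqi
    simp only [Bool.and_eq_true, decide_eq_true_eq, not_and]
    intro hcontra
    omega
  have hdrop : (P.drop (idx + 1)).countP
      (fun q => decide (P[idx] < q) && decide (q ≤ k - 1 - P[idx]))
      = (P.drop (idx + 1)).countP (fun q => decide (q ≤ k - 1 - P[idx])) := by
    refine List.countP_congr ?_
    intro q hq
    obtain ⟨i, hi, hqi⟩ := List.mem_iff_getElem.mp hq
    have hi' : idx + 1 + i < P.length := by
      have := List.length_drop (i := idx + 1) (l := P); omega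
    have hgt : P[idx] < P[idx + 1 + i] :=
      (List.pairwise_iff_getElem.mp hP) idx (idx + 1 + i) h hi' (by omega)
    rw [List.getElem_drop] at hqi
    subst hqi
    simp [hgt]
  have hbound : (P.drop (idx + 1)).countP (fun q => decide (q ≤ k - 1 - P[idx]))
      = pvBsearch P (k - 1 - P[idx]) 0 P.length - (idx + 1) := by
    refine pvCountP_boundary _ ?_ ?_ ?_
    · have := List.length_drop (i := idx + 1) (l := P); omega
    · intro j hj hjr
      have hj' : idx + 1 + j < P.length := by
        have := List.length_drop (i := idx + 1) (l := P); omega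
      rw [List.getElem_drop]
      simpa using hrlo (idx + 1 + j) hj' (by omega)
    · intro j hj hjr
      have hj' : idx + 1 + j < P.length := by
        have := List.length_drop (i := idx + 1) (l := P); omega
      rw [List.getElem_drop]
      simpa using hrhi (idx + 1 + j) hj' (by omega)
  rw [hcount _, htake, hdrop, hbound]
  split_ifs with hcond <;> omega

-- A's nested loops compute the sum over primes of the pair counts
lemma pvA_count (n k : Int) :
    (PySem.List.pyRange 2 (n + 1) 1).foldl (fun acc i =>
      if pvIsPrime i then
        (PySem.List.pyRange (i + 1) (n + 1) 1).foldl (fun acc2 j =>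
          if pvIsPrime j then (if i + j + 1 ≤ k then acc2 + 1 else acc2) else acc2) acc
      else acc) 0
    = ((pvPl n).map (fun p =>
        ((pvPl n).countP (fun q => decide (p < q) && decide (q ≤ k - 1 - p)) : Int))).sum := by
  -- inner loop is a countP
  have hinner : ∀ (i acc : Int),
      (PySem.List.pyRange (i + 1) (n + 1) 1).foldl (fun acc2 j =>
        if pvIsPrime j then (if i + j + 1 ≤ k then acc2 + 1 else acc2) else acc2) acc
      = acc + ((PySem.List.pyRange (i + 1) (n + 1) 1).countP
          (fun j => pvIsPrime j && decide (i + j + 1 ≤ k)) : Int) := by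
    intro i acc
    rw [PySem.List.foldl_congr_mem _ _
      (fun acc2 j => if pvIsPrime j && decide (i + j + 1 ≤ k) then acc2 + 1 else acc2) acc
      (by intro acc2 j hj
          by_cases h1 : pvIsPrime j <;> by_cases h2 : i + j + 1 ≤ k <;> simp [h1, h2])]
    exact PySem.List.foldl_if_add_one _ _ _
  rw [PySem.List.foldl_congr_mem _ _
    (fun acc i => if pvIsPrime i then
        acc + ((PySem.List.pyRange (i + 1) (n + 1) 1).countP
          (fun j => pvIsPrime j && decide (i + j + 1 ≤ k)) : Int)
      else acc) 0
    (by intro acc i hi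
        by_cases h1 : pvIsPrime i
        · simp only [h1, if_true]
          exact hinner i acc
        · simp [h1])]
  rw [PySem.List.foldl_if_eq_foldl_filter]
  rw [PySem.List.foldl_add]
  rw [show ((PySem.List.pyRange 2 (n + 1) 1).filter (fun i => pvIsPrime i)) = pvPl n from rfl]
  rw [zero_add]
  congr 1
  refine List.map_eq_map_iff.mpr ?_
  intro p hp
  congr 1
  -- p is a prime in [2, n]
  have hpR : p ∈ PySem.List.pyRange 2 (n + 1) 1 := List.mem_of_mem_filter hp
  obtain ⟨hp2, hpn⟩ := PySem.List.mem_pyRange_one.mp hpR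
  -- rewrite the inner range count over the full range, then through the filter
  have hsplit : PySem.List.pyRange 2 (n + 1) 1
      = PySem.List.pyRange 2 (p + 1) 1 ++ PySem.List.pyRange (p + 1) (n + 1) 1 :=
    PySem.List.pyRange_one_append 2 (p + 1) (n + 1) (by omega) (by omega)
  have hcongr : (PySem.List.pyRange (p + 1) (n + 1) 1).countP
      (fun j => pvIsPrime j && decide (p + j + 1 ≤ k))
      = (PySem.List.pyRange (p + 1) (n + 1) 1).countP
      (fun j => (decide (p < j) && decide (j ≤ k - 1 - p)) && pvIsPrime j) := by
    refine List.countP_congr ?_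
    intro j hj
    obtain ⟨hj1, hj2⟩ := PySem.List.mem_pyRange_one.mp hj
    constructor
    · intro hc; simp at hc ⊢; exact ⟨⟨by omega, by omega⟩, hc.1⟩
    · intro hc; simp at hc ⊢; exact ⟨hc.2, by omega⟩
  have hpre : (PySem.List.pyRange 2 (p + 1) 1).countP
      (fun j => (decide (p < j) && decide (j ≤ k - 1 - p)) && pvIsPrime j) = 0 := by
    refine List.countP_eq_zero.mpr ?_
    intro j hj
    obtain ⟨hj1, hj2⟩ := PySem.List.mem_pyRange_one.mp hj
    simp only [Bool.and_eq_true, decide_eq_true_eq, not_and]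
    intro hcontra
    omega
  rw [hcongr]
  unfold pvPl
  rw [List.countP_filter, hsplit, List.countP_append, hpre, Nat.zero_add]

-- B's loop computes the same sum
lemma pvB_count (n k : Int) :
    (PySem.List.enumerate (pvPl n) 0).foldl (fun acc pr =>
      if ((pvBsearch (pvPl n) (k - 1 - pr.2) 0 (pvPl n).length : Int) > pr.1 + 1)
        then acc + ((pvBsearch (pvPl n) (k - 1 - pr.2) 0 (pvPl n).length : Int) - pr.1 - 1)
        else acc) 0
    = ((pvPl n).map (fun p =>
        ((pvPl n).countP (fun q => decide (p < q) && decide (q ≤ k - 1 - p)) : Int))).sum := by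
  rw [PySem.List.foldl_congr_mem _ _
    (fun acc pr => acc +
      (if ((pvBsearch (pvPl n) (k - 1 - pr.2) 0 (pvPl n).length : Int) > pr.1 + 1)
        then ((pvBsearch (pvPl n) (k - 1 - pr.2) 0 (pvPl n).length : Int) - pr.1 - 1)
        else 0)) 0
    (by intro acc pr hpr
        split_ifs with hc <;> simp <;> omega)]
  rw [PySem.List.foldl_add, zero_add]
  congr 1
  refine List.ext_getElem ?_ ?_
  · simp [PySem.List.length_enumerate]
  · intro i h1 h2
    simp only [List.getElem_map]
    rw [PySem.List.getElem_enumerate]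
    have hlen : i < (pvPl n).length := by
      simpa [PySem.List.length_enumerate] using h1
    have := pvKey (pvPl n) (pvPl_pairwise n) k i hlen
    simpa [zero_add] using this

-- ===== VERDICT (by name: the statement is the Claim_ definition above) =====
theorem cashew_conjecture_spec : Claim_equal_cashew_conjecture := by
  intro n k _
  show cashew_conjecture n k = cashew_conjecture_alt n k
  unfold cashew_conjecture cashew_conjecture_alt
  dsimp only
  rw [pvA_count n k]
  rw [show ((PySem.List.pyRange 2 (n + 1) 1).filter (fun i => pvIsPrime i)) = pvPl n from rfl]
  rw [pvB_count n k]
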